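-- pv_equiv track=rewrite | github.com/42clim-s-Study/Algorithm | 3week_1874_16926/16926_array_rotation.py | init_array
-- ===== SOURCE A (Python) =====
-- def init_array(row: int, col: int):
--     array = [[] for _ in range(row)]
--     cdx = 0
--     for i in range(1, row * col + 1):
--         array[cdx].append(i)
--         if i % col == 0:
--             cdx += 1
--     return array
-- ===== SOURCE B (Python) =====
-- def init_array(row: int, col: int):
--     return [[r * col + c + 1 for c in range(col)] for r in range(row)]
-- ===== Notes on version B (the rewrite author's own statement) =====
-- stated objective: simpler
-- what changed: Replaces the flat 1-D loop over 1..row*col with a running counter and a modulo-driven row pointer by a nested comprehension that computes each cell directly from its (row, column) indices as r*col+c+1.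
import Mathlib
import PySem

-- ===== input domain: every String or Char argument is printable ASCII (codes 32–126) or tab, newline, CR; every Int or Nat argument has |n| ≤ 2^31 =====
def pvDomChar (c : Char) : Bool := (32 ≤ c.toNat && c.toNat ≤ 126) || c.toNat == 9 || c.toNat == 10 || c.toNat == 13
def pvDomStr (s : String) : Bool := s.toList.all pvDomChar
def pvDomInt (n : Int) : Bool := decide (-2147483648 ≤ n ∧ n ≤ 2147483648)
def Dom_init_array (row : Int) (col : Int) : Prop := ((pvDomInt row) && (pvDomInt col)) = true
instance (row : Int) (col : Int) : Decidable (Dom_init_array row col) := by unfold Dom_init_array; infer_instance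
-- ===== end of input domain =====

-- B fills each cell by the closed form r*col+c+1 in a nested comprehension instead of A's
-- flat counter loop with a modulo-driven row pointer; objective: simpler.

-- ===== PORT A =====
-- the body of A's for-loop: append i to row cdx, advance cdx when i % col == 0
def stepA (col : Int) (st : List (List Int) × Int) (i : Int) : List (List Int) × Int :=
  (st.1.set st.2.toNat ((st.1.getD st.2.toNat []) ++ [i]),
   if PySem.Int.mod i col = 0 then st.2 + 1 else st.2)

def init_array (row : Int) (col : Int) : List (List Int) :=
  ((PySem.List.pyRange 1 (row * col + 1) 1).foldl (stepA col)
    ((PySem.List.pyRange 0 row 1).map (fun _ => []), 0)).1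

-- ===== PORT B =====
def init_array_alt (row : Int) (col : Int) : List (List Int) :=
  (PySem.List.pyRange 0 row 1).map (fun r =>
    (PySem.List.pyRange 0 col 1).map (fun c => r * col + c + 1))

-- ===== PRECONDITION & SPEC =====
-- Pre_ excludes only row < 0 ∧ col < 0, where row*col > 0 but the outer array is empty, so A raises IndexError.
def Pre_init_array (row : Int) (col : Int) : Prop := ¬ (row < 0 ∧ col < 0)
instance (row : Int) (col : Int) : Decidable (Pre_init_array row col) := by unfold Pre_init_array; infer_instance
def pvWitness_init_array : Int × Int := (3, 4)

def Spec_init_array (row : Int) (col : Int) (out : List (List Int)) : Prop := out = init_array_alt row col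
instance (row : Int) (col : Int) (out : List (List Int)) : Decidable (Spec_init_array row col out) := by unfold Spec_init_array; infer_instance

-- ===== CLAIM (what is proved, stated in full; the proofs are below) =====
def Claim_equal_init_array : Prop := ∀ (row : Int) (col : Int), Dom_init_array row col → Pre_init_array row col → Spec_init_array row col (init_array row col)

-- ===== LEMMAS AND PROOFS =====

lemma getD_mid (X Y : List (List Int)) (p : List Int) : (X ++ p :: Y).getD X.length [] = p := by
  induction X with
  | nil => rfl
  | cons a X ih => simp [ih]

lemma set_mid (X Y : List (List Int)) (p q : List Int) : (X ++ p :: Y).set X.length q = X ++ q :: Y := by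
  induction X with
  | nil => rfl
  | cons a X ih => simp [ih]

-- one row: from pointer t with a partially filled row, the elements
-- t*k+j+1 .. t*k+k complete that row and advance the pointer to t+1
lemma fill_row (k : Nat) (_hk : 1 ≤ k) :
    ∀ (m : Nat), 1 ≤ m → ∀ (t j : Nat) (X Y : List (List Int)), X.length = t → j + m = k →
    (PySem.List.pyRange (((t * k + j : Nat) : Int) + 1) (((t * k + k : Nat) : Int) + 1) 1).foldl
        (stepA (k : Int))
        (X ++ ((List.range j).map fun c => ((t * k + c : Nat) : Int) + 1) :: Y, (t : Int))
      = (X ++ ((List.range k).map fun c => ((t * k + c : Nat) : Int) + 1) :: Y, (t : Int) + 1) := by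
  intro m
  induction m with
  | zero => omega
  | succ m ih =>
    intro _ t j X Y hX hjm
    subst hX
    by_cases hm : m = 0
    · subst hm
      have hj : j + 1 = k := by omega
      have hend : ((X.length * k + k : Nat) : Int) + 1 = (((X.length * k + j : Nat) : Int) + 1) + 1 := by
        push_cast; omega
      rw [hend, PySem.List.pyRange_one_singleton]
      simp only [List.foldl_cons, List.foldl_nil, stepA, Int.toNat_natCast]
      rw [getD_mid, set_mid]
      have hmod : PySem.Int.mod (((X.length * k + j : Nat) : Int) + 1) (k : Int) = 0 := by
        have hcast : (((X.length * k + j : Nat) : Int) + 1) = ((X.length * k + j + 1 : Nat) : Int) := by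
          push_cast; ring
        rw [hcast, PySem.Int.mod_natCast]
        have : X.length * k + j + 1 = (X.length + 1) * k := by
          have : X.length * k + j + 1 = X.length * k + k := by omega
          rw [this]; ring
        rw [this, Nat.mul_mod_left]; rfl
      rw [if_pos hmod]
      have hrow : ((List.range j).map fun c => ((X.length * k + c : Nat) : Int) + 1)
            ++ [((X.length * k + j : Nat) : Int) + 1]
          = (List.range k).map fun c => ((X.length * k + c : Nat) : Int) + 1 := by
        rw [← hj, List.range_succ, List.map_append]; rfl
      rw [hrow]
    · have hm1 : 1 ≤ m := Nat.one_le_iff_ne_zero.mpr hm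
      have hjk : j + 1 < k := by omega
      have hlt : (((X.length * k + j : Nat) : Int) + 1) < (((X.length * k + k : Nat) : Int) + 1) := by
        have h : X.length * k + j + 1 < X.length * k + k + 1 := by omega
        exact_mod_cast h
      rw [PySem.List.pyRange_one_cons hlt, List.foldl_cons]
      simp only [stepA, Int.toNat_natCast]
      rw [getD_mid, set_mid]
      have hmod : PySem.Int.mod (((X.length * k + j : Nat) : Int) + 1) (k : Int) = ((j + 1 : Nat) : Int) := by
        have hcast : (((X.length * k + j : Nat) : Int) + 1) = ((X.length * k + (j + 1) : Nat) : Int) := by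
          push_cast; ring
        rw [hcast, PySem.Int.mod_natCast]
        congr 1
        rw [Nat.mul_comm, Nat.mul_add_mod]
        exact Nat.mod_eq_of_lt hjk
      rw [hmod, if_neg (by exact_mod_cast Nat.succ_ne_zero j)]
      have hrow : ((List.range j).map fun c => ((X.length * k + c : Nat) : Int) + 1)
            ++ [((X.length * k + j : Nat) : Int) + 1]
          = (List.range (j + 1)).map fun c => ((X.length * k + c : Nat) : Int) + 1 := by
        rw [List.range_succ, List.map_append]; rfl
      rw [hrow]
      have hstart : (((X.length * k + j : Nat) : Int) + 1) + 1 = ((X.length * k + (j + 1) : Nat) : Int) + 1 := by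
        push_cast; ring
      rw [hstart]
      exact ih hm1 X.length (j + 1) X Y rfl (by omega)

-- n rows from pointer t: the elements t*k+1 .. (t+n)*k fill the n empty rows
lemma fill_rows (k : Nat) (hk : 1 ≤ k) :
    ∀ (n t : Nat) (X : List (List Int)), X.length = t →
    (PySem.List.pyRange (((t * k : Nat) : Int) + 1) ((((t + n) * k : Nat) : Int) + 1) 1).foldl
        (stepA (k : Int))
        (X ++ (List.range n).map (fun _ => ([] : List Int)), (t : Int))
      = (X ++ (List.range n).map (fun r => (List.range k).map fun c => (((t + r) * k + c : Nat) : Int) + 1),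
         (t : Int) + n) := by
  intro n
  induction n with
  | zero => intro t X hX; simp [PySem.List.pyRange_one_eq_nil]
  | succ n ih =>
    intro t X hX
    subst hX
    have hsplit : PySem.List.pyRange (((X.length * k : Nat) : Int) + 1) ((((X.length + (n + 1)) * k : Nat) : Int) + 1) 1
        = PySem.List.pyRange (((X.length * k : Nat) : Int) + 1) (((X.length * k + k : Nat) : Int) + 1) 1
          ++ PySem.List.pyRange (((X.length * k + k : Nat) : Int) + 1) ((((X.length + (n + 1)) * k : Nat) : Int) + 1) 1 := by
      apply PySem.List.pyRange_one_append
      · have h : X.length * k + 1 ≤ X.length * k + k + 1 := by omega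
        exact_mod_cast h
      · have h : X.length * k + k + 1 ≤ (X.length + (n + 1)) * k + 1 := by
          have : (X.length + 1) * k ≤ (X.length + (n + 1)) * k :=
            Nat.mul_le_mul_right k (by omega)
          have e : (X.length + 1) * k = X.length * k + k := by ring
          omega
        exact_mod_cast h
    rw [hsplit, List.foldl_append]
    have hmap : (List.range (n + 1)).map (fun _ => ([] : List Int))
        = ([] : List Int) :: (List.range n).map (fun _ => ([] : List Int)) := by
      simp [List.map_const', List.replicate_succ]
    rw [hmap]
    have h1 := fill_row k hk k hk X.length 0 X ((List.range n).map (fun _ => ([] : List Int))) rfl (by omega)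
    simp only [Nat.add_zero, List.range_zero, List.map_nil] at h1
    rw [h1]
    have hassoc : X ++ ((List.range k).map fun c => ((X.length * k + c : Nat) : Int) + 1)
          :: (List.range n).map (fun _ => ([] : List Int))
        = (X ++ [(List.range k).map fun c => ((X.length * k + c : Nat) : Int) + 1])
          ++ (List.range n).map (fun _ => ([] : List Int)) := by
      simp
    have hstart : ((X.length * k + k : Nat) : Int) + 1 = (((X.length + 1) * k : Nat) : Int) + 1 := by
      push_cast; ring
    have hptr : (X.length : Int) + 1 = ((X.length + 1 : Nat) : Int) := by push_cast; ring
    rw [hassoc, hstart, hptr]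
    have h2 := ih (X.length + 1) (X ++ [(List.range k).map fun c => ((X.length * k + c : Nat) : Int) + 1])
      (by simp)
    rw [show X.length + (n + 1) = X.length + 1 + n from by omega, h2]
    rw [Prod.mk.injEq]
    refine ⟨?_, ?_⟩
    · rw [List.range_succ_eq_map]
      simp only [List.map_cons, List.map_map, Nat.add_zero, List.append_assoc, List.cons_append,
        List.nil_append]
      congr 1
      congr 1
      apply List.map_congr_left
      intro r _
      have harg : X.length + 1 + r = X.length + (r + 1) := by omega
      simp [Function.comp, Nat.succ_eq_add_one, harg]
    · push_cast; ring

-- ===== VERDICT (by name: the statement is the Claim_ definition above) =====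
theorem init_array_spec : Claim_equal_init_array := by
  intro row col _ hpre
  unfold Spec_init_array init_array init_array_alt
  by_cases hr : row ≤ 0
  · have hrc : row * col ≤ 0 := by
      by_cases hc : 0 ≤ col
      · have := mul_le_mul_of_nonneg_right hr hc
        simpa using this
      · have hc' : col < 0 := by omega
        have hr0 : ¬ row < 0 := fun h => hpre ⟨h, hc'⟩
        have : row = 0 := by omega
        simp [this]
    have h1 : PySem.List.pyRange 0 row 1 = [] := PySem.List.pyRange_one_eq_nil hr
    have h2 : PySem.List.pyRange 1 (row * col + 1) 1 = [] :=
      PySem.List.pyRange_one_eq_nil (by omega)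
    rw [h1, h2]; simp
  · have hr : 0 < row := by omega
    by_cases hc : col ≤ 0
    · have hrc : row * col ≤ 0 := by nlinarith
      have h2 : PySem.List.pyRange 1 (row * col + 1) 1 = [] :=
        PySem.List.pyRange_one_eq_nil (by omega)
      have h3 : PySem.List.pyRange 0 col 1 = [] := PySem.List.pyRange_one_eq_nil hc
      rw [h2, h3]; simp
    · have hc : 0 < col := by omega
      -- row > 0, col > 0
      obtain ⟨n, hn⟩ : ∃ n : Nat, row = (n : Int) := ⟨row.toNat, (Int.toNat_of_nonneg hr.le).symm⟩
      obtain ⟨k, hkk⟩ : ∃ k : Nat, col = (k : Int) := ⟨col.toNat, (Int.toNat_of_nonneg hc.le).symm⟩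
      subst hn; subst hkk
      have hk : 1 ≤ k := by exact_mod_cast hc
      have e1 : PySem.List.pyRange 0 (n : Int) 1 = (List.range n).map (fun j : Nat => (j : Int)) := by
        rw [PySem.List.pyRange_one]; simp
      have e2 : PySem.List.pyRange 0 (k : Int) 1 = (List.range k).map (fun j : Nat => (j : Int)) := by
        rw [PySem.List.pyRange_one]; simp
      have main := fill_rows k hk n 0 [] rfl
      simp only [Nat.zero_mul, Nat.zero_add, Nat.cast_zero, Int.zero_add, List.nil_append] at main
      have hr1 : ((n : Int) * (k : Int) + 1) = (((n * k : Nat) : Int) + 1) := by push_cast; ring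
      rw [e1, hr1, List.map_map,
        show ((fun _ => ([] : List Int)) ∘ (fun j : Nat => (j : Int))) = (fun _ : Nat => ([] : List Int)) from rfl,
        main, e2]
      simp only [List.map_map]
      apply List.map_congr_left
      intro r _
      simp only [Function.comp]
      apply List.map_congr_left
      intro c _
      simp only [Function.comp_apply]
      push_cast
      ring
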